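-- pv_equiv track=rewrite | github.com/bruce-yang-422/shopee_product_excel_data_processor_and_updater | scripts/convert_input_to_csv.py | _normalize_worksheet_xml
-- ===== SOURCE A (Python) =====
-- PANE_VALUE_REPLACEMENTS = {
--     "bottom_left": "bottomLeft",
--     "bottom_right": "bottomRight",
--     "top_left": "topLeft",
--     "top_right": "topRight",
-- }
--
-- def _normalize_worksheet_xml(xml_text: str) -> str:
--     """修正已知的無效工作表 pane 值，避免 openpyxl 解析失敗。"""
--
--     normalized = xml_text
--     for bad_value, good_value in PANE_VALUE_REPLACEMENTS.items():
--         normalized = normalized.replace(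
--             f'activePane="{bad_value}"',
--             f'activePane="{good_value}"',
--         )
--         normalized = normalized.replace(
--             f'pane="{bad_value}"',
--             f'pane="{good_value}"',
--         )
--     return normalized
-- ===== SOURCE B (Python) =====
-- PANE_VALUE_REPLACEMENTS = {
--     "bottom_left": "bottomLeft",
--     "bottom_right": "bottomRight",
--     "top_left": "topLeft",
--     "top_right": "topRight",
-- }
--
-- def _normalize_worksheet_xml(xml_text: str) -> str:
--     """Single left-to-right pass: at each position replace the first matching
--     bad pane attribute, instead of eight whole-string replace passes."""
--     rules = []
--     for bad_value, good_value in PANE_VALUE_REPLACEMENTS.items():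
--         for attr in ("activePane", "pane"):
--             rules.append((f'{attr}="{bad_value}"', f'{attr}="{good_value}"'))
--     out = []
--     i = 0
--     n = len(xml_text)
--     while i < n:
--         for old, new in rules:
--             if xml_text.startswith(old, i):
--                 out.append(new)
--                 i += len(old)
--                 break
--         else:
--             out.append(xml_text[i])
--             i += 1
--     return "".join(out)
-- ===== Notes on version B (the rewrite author's own statement) =====
-- stated objective: alternative
-- what changed: Replaced the eight sequential whole-string str.replace passes with a single left-to-right scan that, at each position, applies the first matching rewrite rule from a precomputed rule list (one pass over the text instead of eight).
import Mathlib
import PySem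

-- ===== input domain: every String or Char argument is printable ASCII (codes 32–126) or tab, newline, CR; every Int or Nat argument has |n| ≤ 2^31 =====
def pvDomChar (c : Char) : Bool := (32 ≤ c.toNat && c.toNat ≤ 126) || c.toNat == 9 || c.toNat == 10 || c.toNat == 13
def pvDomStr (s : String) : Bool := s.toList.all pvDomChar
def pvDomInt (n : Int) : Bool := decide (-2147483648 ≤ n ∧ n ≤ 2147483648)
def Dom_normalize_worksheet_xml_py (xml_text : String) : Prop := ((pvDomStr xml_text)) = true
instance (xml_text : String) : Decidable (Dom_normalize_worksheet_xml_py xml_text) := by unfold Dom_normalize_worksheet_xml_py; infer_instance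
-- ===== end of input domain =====

-- B replaces A's eight whole-string str.replace passes by ONE left-to-right scan that
-- applies the first matching rewrite rule at each position (objective: alternative).

-- ===== PORT A =====
def normalize_worksheet_xml_py (xml_text : String) : String :=
  let normalized := xml_text
  let normalized := PySem.Str.replace normalized "activePane=\"bottom_left\"" "activePane=\"bottomLeft\""
  let normalized := PySem.Str.replace normalized "pane=\"bottom_left\"" "pane=\"bottomLeft\""
  let normalized := PySem.Str.replace normalized "activePane=\"bottom_right\"" "activePane=\"bottomRight\""
  let normalized := PySem.Str.replace normalized "pane=\"bottom_right\"" "pane=\"bottomRight\""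
  let normalized := PySem.Str.replace normalized "activePane=\"top_left\"" "activePane=\"topLeft\""
  let normalized := PySem.Str.replace normalized "pane=\"top_left\"" "pane=\"topLeft\""
  let normalized := PySem.Str.replace normalized "activePane=\"top_right\"" "activePane=\"topRight\""
  let normalized := PySem.Str.replace normalized "pane=\"top_right\"" "pane=\"topRight\""
  normalized

-- ===== PORT B =====
-- the PANE_VALUE_REPLACEMENTS dict of Source B (association list, insertion order)
def pvPaneReplacements : List (String × String) :=
  [("bottom_left", "bottomLeft"), ("bottom_right", "bottomRight"),
   ("top_left", "topLeft"), ("top_right", "topRight")]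

-- Source B: rules = [(f'{attr}="{bad}"', f'{attr}="{good}"') for bad,good in items for attr in (...)]
def pvRulesB : List (List Char × List Char) :=
  pvPaneReplacements.flatMap (fun bg =>
    ["activePane", "pane"].map (fun attr =>
      ((attr ++ "=\"" ++ bg.1 ++ "\"").toList, (attr ++ "=\"" ++ bg.2 ++ "\"").toList)))

-- Source B's while loop over positions: at the current position take the first rule whose
-- pattern matches (for/else with startswith), else copy one character.  fuel = |input|.
def pvScanGo (rules : List (List Char × List Char)) : Nat → List Char → List Char
  | _, [] => []
  | 0, _ :: _ => []
  | fuel+1, c :: t =>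
    match rules.find? (fun r => r.1.isPrefixOf (c :: t)) with
    | some r => r.2 ++ pvScanGo rules fuel ((c :: t).drop r.1.length)
    | none => c :: pvScanGo rules fuel t

def pvScan (rules : List (List Char × List Char)) (l : List Char) : List Char :=
  pvScanGo rules l.length l

def normalize_worksheet_xml_py_alt (xml_text : String) : String :=
  String.ofList (pvScan pvRulesB xml_text.toList)

-- ===== PRECONDITION & SPEC =====
def Spec_normalize_worksheet_xml_py (xml_text : String) (out : String) : Prop := out = normalize_worksheet_xml_py_alt xml_text
instance (xml_text : String) (out : String) : Decidable (Spec_normalize_worksheet_xml_py xml_text out) := by unfold Spec_normalize_worksheet_xml_py; infer_instance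

-- ===== CLAIM (what is proved, stated in full; the proofs are below) =====
def Claim_equal_normalize_worksheet_xml_py : Prop := ∀ (xml_text : String), Dom_normalize_worksheet_xml_py xml_text → Spec_normalize_worksheet_xml_py xml_text (normalize_worksheet_xml_py xml_text)

-- ===== LEMMAS AND PROOFS =====

-- `u` cannot begin a match at any position i (lo ≤ i < |v|) inside `v`, whatever follows v.
abbrev pvNoOv (u v : List Char) (lo : Nat) : Prop :=
  ∀ i < v.length, lo ≤ i →
    ¬ (u.take (v.length - i) = v.drop i) ∧ ¬ ((v.drop i).take u.length = u)

lemma pvNoOv_not_prefix_inside {u v : List Char} {lo i : Nat} (h : pvNoOv u v lo)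
    (hlo : lo ≤ i) (hi : i < v.length) (X : List Char) : ¬ u <+: (v.drop i ++ X) := by
  intro hpre
  obtain ⟨h1, h2⟩ := h i hi hlo
  have hd : (v.drop i).length = v.length - i := by simp
  rw [List.prefix_iff_eq_take, List.take_append, hd] at hpre
  by_cases hlen : u.length ≤ v.length - i
  · rw [Nat.sub_eq_zero_of_le hlen] at hpre
    simp at hpre
    exact h2 hpre.symm
  · have hfull : (v.drop i).take u.length = v.drop i := by
      apply List.take_of_length_le; omega
    rw [hfull] at hpre
    have h' := congrArg (List.take (v.length - i)) hpre
    rw [List.take_append, hd, Nat.sub_self, List.take_zero, List.append_nil,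
        List.take_of_length_le (le_of_eq hd)] at h'
    exact h1 h'

lemma pvNoOv_not_suffix_start {u v : List Char} {lo i : Nat} (h : pvNoOv u v lo)
    (hlo : lo ≤ i) (hi : i < v.length) (X : List Char) : ¬ (v.drop i) <+: (u ++ X) := by
  intro hpre
  obtain ⟨h1, h2⟩ := h i hi hlo
  have hd : (v.drop i).length = v.length - i := by simp
  rw [List.prefix_iff_eq_take, List.take_append, hd] at hpre
  by_cases hlen : v.length - i ≤ u.length
  · rw [Nat.sub_eq_zero_of_le hlen] at hpre
    simp at hpre
    exact h1 hpre.symm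
  · have hfull : u.take (v.length - i) = u := by
      apply List.take_of_length_le; omega
    rw [hfull] at hpre
    have h' := congrArg (List.take u.length) hpre
    rw [List.take_append, Nat.sub_self, List.take_zero, List.append_nil,
        List.take_of_length_le (Nat.le_refl u.length)] at h'
    exact h2 h'

lemma pvScan_nil (rules : List (List Char × List Char)) : pvScan rules [] = [] := by
  simp [pvScan, pvScanGo]

lemma pvScanGo_eq_pvScan (rules : List (List Char × List Char))
    (hg : ∀ r ∈ rules, r.1 ≠ []) :
    ∀ fuel l, l.length ≤ fuel → pvScanGo rules fuel l = pvScan rules l := by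
  intro fuel
  induction fuel using Nat.strong_induction_on with
  | _ fuel IH =>
    intro l hl
    cases l with
    | nil => cases fuel <;> simp [pvScan, pvScanGo]
    | cons c t =>
      cases fuel with
      | zero => simp at hl
      | succ f =>
        have hlt : t.length + 1 ≤ f + 1 := by simpa using hl
        show pvScanGo rules (f + 1) (c :: t) = pvScanGo rules (t.length + 1) (c :: t)
        cases hfind : rules.find? (fun r => r.1.isPrefixOf (c :: t)) with
        | none =>
          simp only [pvScanGo, hfind]
          rw [IH f (by omega) t (by omega), IH t.length (by omega) t le_rfl]
        | some r =>
          have hmem : r ∈ rules := List.mem_of_find?_eq_some hfind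
          have hpre : r.1 <+: (c :: t) := List.isPrefixOf_iff_prefix.mp (by
            have := List.find?_some hfind; simpa using this)
          have hr1 : r.1.length ≥ 1 := by
            have := hg r hmem
            cases hx : r.1 with
            | nil => exact absurd hx this
            | cons a b => simp
          have hdl : ((c :: t).drop r.1.length).length ≤ f := by
            simp only [List.length_drop, List.length_cons]; omega
          simp only [pvScanGo, hfind]
          rw [IH f (by omega) _ hdl, IH t.length (by omega) _ (by
            simp only [List.length_drop, List.length_cons]; omega)]

lemma pvScan_match (rules : List (List Char × List Char)) (hg : ∀ r ∈ rules, r.1 ≠ [])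
    (l : List Char) (r : List Char × List Char)
    (hfind : rules.find? (fun r => r.1.isPrefixOf l) = some r) :
    pvScan rules l = r.2 ++ pvScan rules (l.drop r.1.length) := by
  have hmem : r ∈ rules := List.mem_of_find?_eq_some hfind
  have hpre : r.1 <+: l := List.isPrefixOf_iff_prefix.mp (by
    have := List.find?_some hfind; simpa using this)
  have hr1 : r.1.length ≥ 1 := by
    have := hg r hmem
    cases hx : r.1 with
    | nil => exact absurd hx this
    | cons a b => simp
  cases l with
  | nil =>
    have : r.1 = [] := List.prefix_nil.mp hpre
    exact absurd this (hg r hmem)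
  | cons c t =>
    show pvScanGo rules (t.length + 1) (c :: t) = _
    simp only [pvScanGo, hfind]
    rw [pvScanGo_eq_pvScan rules hg t.length _ (by
      simp only [List.length_drop, List.length_cons]; omega)]

lemma pvScan_none (rules : List (List Char × List Char)) (c : Char) (t : List Char)
    (hfind : rules.find? (fun r => r.1.isPrefixOf (c :: t)) = none) :
    pvScan rules (c :: t) = c :: pvScan rules t := by
  show pvScanGo rules (t.length + 1) (c :: t) = _
  simp only [pvScanGo, hfind]
  rfl

lemma pv_replaceGo_eq (p q : List Char) (hp : p ≠ []) :
    ∀ fuel l acc, l.length ≤ fuel →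
      PySem.Chars.replace.go p q fuel l acc = acc.reverse ++ pvScan [(p, q)] l := by
  have hg : ∀ r ∈ [(p, q)], r.1 ≠ [] := by intro r hr; simp at hr; subst hr; exact hp
  have hp1 : p.length ≥ 1 := by
    cases hx : p with
    | nil => exact absurd hx hp
    | cons a b => simp
  intro fuel
  induction fuel with
  | zero =>
    intro l acc hl
    have : l = [] := by cases l <;> simp_all
    subst this
    simp [PySem.Chars.replace.go, pvScan_nil]
  | succ f IHf =>
    intro l acc hl
    cases l with
    | nil => simp [PySem.Chars.replace.go, pvScan_nil]
    | cons c t =>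
      rw [PySem.Chars.replace.go]
      by_cases hpre : p.isPrefixOf (c :: t)
      · rw [if_pos hpre]
        have hdl : ((c :: t).drop p.length).length ≤ f := by
          simp only [List.length_drop, List.length_cons]
          simp only [List.length_cons] at hl; omega
        rw [IHf _ _ hdl]
        have hfind : [(p, q)].find? (fun r => r.1.isPrefixOf (c :: t)) = some (p, q) := by
          simp [List.find?, hpre]
        rw [pvScan_match [(p, q)] hg (c :: t) (p, q) hfind]
        simp
      · rw [if_neg hpre]
        rw [IHf t (c :: acc) (by simp only [List.length_cons] at hl; omega)]
        have hfind : [(p, q)].find? (fun r => r.1.isPrefixOf (c :: t)) = none := by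
          simp [List.find?, hpre]
        rw [pvScan_none _ _ _ hfind]
        simp

lemma pv_replace_eq_pvScan (l p q : List Char) (hp : p ≠ []) :
    PySem.Chars.replace l p q = pvScan [(p, q)] l := by
  rw [PySem.Chars.replace]
  have hne : p.isEmpty = false := by simp [hp]
  rw [hne]
  simp only [Bool.false_eq_true, if_false]
  rw [pv_replaceGo_eq p q hp l.length l [] le_rfl]
  simp

lemma pvScan_append_left (p q X : List Char) :
    ∀ u, (∀ i < u.length, ¬ p <+: (u.drop i ++ X)) →
      pvScan [(p, q)] (u ++ X) = u ++ pvScan [(p, q)] X := by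
  intro u
  induction u with
  | nil => simp
  | cons c u' IH =>
    intro h
    have h0 : ¬ p <+: (c :: (u' ++ X)) := by
      have := h 0 (by simp)
      simpa using this
    have hb : p.isPrefixOf (c :: (u' ++ X)) = false := by
      rw [← Bool.not_eq_true, List.isPrefixOf_iff_prefix]; exact h0
    have hfind : [(p, q)].find? (fun r => r.1.isPrefixOf (c :: (u' ++ X))) = none := by
      simp [List.find?, hb]
    have IH' := IH (fun i hi => by
      have h' := h (i + 1) (by simp only [List.length_cons]; omega)
      simpa using h')
    rw [List.cons_append, pvScan_none _ _ _ hfind, IH', List.cons_append]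

lemma pvScan_take_drop (rules : List (List Char × List Char)) :
    ∀ (k : Nat) (l : List Char), k ≤ l.length →
      (∀ i < k, ∀ r ∈ rules, ¬ r.1 <+: l.drop i) →
      pvScan rules l = l.take k ++ pvScan rules (l.drop k) := by
  intro k
  induction k with
  | zero => intro l _ _; simp
  | succ k IH =>
    intro l hk h
    cases l with
    | nil => simp at hk
    | cons c t =>
      have hfind : rules.find? (fun r => r.1.isPrefixOf (c :: t)) = none := by
        rw [List.find?_eq_none]
        intro r hr
        simpa [List.isPrefixOf_iff_prefix] using h 0 (by omega) r hr
      rw [pvScan_none _ _ _ hfind,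
        IH t (by simpa using hk) (fun i hi r hr => by
          have := h (i + 1) (by omega) r hr
          simpa using this)]
      simp

lemma pvScan_decomp (rules : List (List Char × List Char)) (hg : ∀ r ∈ rules, r.1 ≠ []) :
    ∀ l, pvScan rules l = l ∨ ∃ m r, r ∈ rules ∧ r.1 <+: l.drop m ∧ m < l.length ∧
      pvScan rules l = l.take m ++ r.2 ++ pvScan rules (l.drop (m + r.1.length)) := by
  intro l
  induction l with
  | nil => left; exact pvScan_nil rules
  | cons c t IH =>
    cases hfind : rules.find? (fun r => r.1.isPrefixOf (c :: t)) with
    | some r =>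
      right
      refine ⟨0, r, List.mem_of_find?_eq_some hfind, ?_, by simp, ?_⟩
      · simpa using List.isPrefixOf_iff_prefix.mp (by
          have := List.find?_some hfind; simpa using this)
      · rw [pvScan_match rules hg _ r hfind]; simp
    | none =>
      rcases IH with h | ⟨m, r, hmem, hpre, hm, heq⟩
      · left; rw [pvScan_none _ _ _ hfind, h]
      · right
        refine ⟨m + 1, r, hmem, by simpa using hpre, by simpa using Nat.succ_lt_succ hm, ?_⟩
        rw [pvScan_none _ _ _ hfind, heq]
        have hdrop : (c :: t).drop (m + 1 + r.1.length) = t.drop (m + r.1.length) := by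
          have : m + 1 + r.1.length = (m + r.1.length) + 1 := by omega
          rw [this, List.drop_succ_cons]
        rw [hdrop]
        simp

lemma pvScan_prefix_reflect (rules : List (List Char × List Char))
    (hg1 : ∀ r ∈ rules, r.1 ≠ []) (hg2 : ∀ r ∈ rules, r.2 ≠ []) (p : List Char)
    (hA : ∀ r ∈ rules, pvNoOv p r.2 0) (hC : ∀ r ∈ rules, pvNoOv r.2 p 1)
    (l : List Char) (hpl : p <+: pvScan rules l) : p <+: l := by
  rcases pvScan_decomp rules hg1 l with h | ⟨m, r, hmem, hpre, hm, heq⟩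
  · rwa [h] at hpl
  · rw [heq, List.append_assoc] at hpl
    have hml : m ≤ l.length := le_of_lt hm
    have hlm : (l.take m).length = m := by simp; omega
    by_cases hlen : p.length ≤ m
    · rw [List.prefix_iff_eq_take, List.take_append, hlm, Nat.sub_eq_zero_of_le hlen,
        List.take_zero, List.append_nil, List.take_take, Nat.min_eq_left hlen] at hpl
      rw [hpl]
      exact List.take_prefix _ _
    · exfalso
      rw [List.prefix_iff_eq_take, List.take_append, hlm,
        List.take_of_length_le (by omega : (l.take m).length ≤ p.length)] at hpl
      have hsuf : p.drop m = (r.2 ++ pvScan rules (l.drop (m + r.1.length))).take (p.length - m) := by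
        have := congrArg (List.drop m) hpl
        rwa [List.drop_append, hlm, Nat.sub_self, List.drop_zero,
          List.drop_of_length_le (le_of_eq hlm), List.nil_append] at this
      have hsufpre : p.drop m <+: r.2 ++ pvScan rules (l.drop (m + r.1.length)) := by
        rw [hsuf]; exact List.take_prefix _ _
      rcases Nat.eq_zero_or_pos m with hm0 | hm1
      · subst hm0
        have := pvNoOv_not_prefix_inside (hA r hmem) (Nat.zero_le 0)
          (by have := hg2 r hmem; cases hx : r.2 with
              | nil => exact absurd hx this
              | cons a b => simp) (pvScan rules (l.drop (0 + r.1.length)))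
        simp only [List.drop_zero] at this hsufpre
        exact this hsufpre
      · exact pvNoOv_not_suffix_start (hC r hmem) hm1 (by omega) _ hsufpre

lemma pvScan_fusion (P : List (List Char × List Char)) (p q : List Char) (hp : p ≠ [])
    (hgP1 : ∀ r ∈ P, r.1 ≠ []) (hgP2 : ∀ r ∈ P, r.2 ≠ [])
    (hA : ∀ r ∈ P, pvNoOv p r.2 0) (hB : ∀ r ∈ P, pvNoOv r.1 p 1)
    (hC : ∀ r ∈ P, pvNoOv r.2 p 1) :
    ∀ l, pvScan [(p, q)] (pvScan P l) = pvScan (P ++ [(p, q)]) l := by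
  have hgS : ∀ r ∈ [(p, q)], r.1 ≠ [] := by intro r hr; simp at hr; subst hr; exact hp
  have hgA : ∀ r ∈ P ++ [(p, q)], r.1 ≠ [] := by
    intro r hr
    rcases List.mem_append.mp hr with h | h
    · exact hgP1 r h
    · exact hgS r h
  have hp1 : p.length ≥ 1 := by
    cases hx : p with
    | nil => exact absurd hx hp
    | cons a b => simp
  suffices H : ∀ n l, l.length ≤ n → pvScan [(p, q)] (pvScan P l) = pvScan (P ++ [(p, q)]) l by
    intro l; exact H l.length l le_rfl
  intro n
  induction n with
  | zero =>
    intro l hl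
    have : l = [] := by cases l <;> simp_all
    subst this
    simp [pvScan_nil]
  | succ n IH =>
    intro l hl
    cases l with
    | nil => simp [pvScan_nil]
    | cons c t =>
      have hlt : t.length + 1 ≤ n + 1 := by simpa using hl
      cases hfind : P.find? (fun r => r.1.isPrefixOf (c :: t)) with
      | some r =>
        have hmem : r ∈ P := List.mem_of_find?_eq_some hfind
        have hr1 : r.1.length ≥ 1 := by
          have := hgP1 r hmem
          cases hx : r.1 with
          | nil => exact absurd hx this
          | cons a b => simp
        have hfindA : (P ++ [(p, q)]).find? (fun r => r.1.isPrefixOf (c :: t)) = some r := by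
          rw [List.find?_append, hfind]; rfl
        rw [pvScan_match P hgP1 _ r hfind, pvScan_match (P ++ [(p, q)]) hgA _ r hfindA]
        rw [pvScan_append_left p q _ r.2
          (fun i hi => pvNoOv_not_prefix_inside (hA r hmem) (Nat.zero_le i) hi _)]
        congr 1
        exact IH _ (by simp only [List.length_drop, List.length_cons]; omega)
      | none =>
        have hnone : ∀ r ∈ P, ¬ r.1 <+: (c :: t) := by
          rw [List.find?_eq_none] at hfind
          intro r hr hcon
          have := hfind r hr
          rw [List.isPrefixOf_iff_prefix] at this
          exact this hcon
        by_cases hpl : p <+: (c :: t)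
        · obtain ⟨rest, hrest⟩ := hpl
          have hplen : p.length ≤ t.length + 1 := by
            have := congrArg List.length hrest
            simp at this; omega
          have htd : pvScan P (c :: t) = p ++ pvScan P ((c :: t).drop p.length) := by
            rw [pvScan_take_drop P p.length (c :: t) (by simpa using hplen)
              (fun i hi r hr => by
                rcases Nat.eq_zero_or_pos i with h0 | h1
                · subst h0; simpa using hnone r hr
                · have hdi : (c :: t).drop i = p.drop i ++ rest := by
                    rw [← hrest, List.drop_append, Nat.sub_eq_zero_of_le (le_of_lt hi),
                      List.drop_zero]
                  rw [hdi]
                  exact pvNoOv_not_prefix_inside (hB r hr) h1 hi rest)]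
            congr 1
            exact (List.prefix_iff_eq_take.mp ⟨rest, hrest⟩).symm
          rw [htd]
          have hb1 : p.isPrefixOf (p ++ pvScan P ((c :: t).drop p.length)) = true :=
            List.isPrefixOf_iff_prefix.mpr (List.prefix_append p _)
          have hfind1 : [(p, q)].find? (fun r => r.1.isPrefixOf
              (p ++ pvScan P ((c :: t).drop p.length))) = some (p, q) := by
            simp [List.find?, hb1]
          rw [pvScan_match [(p, q)] hgS _ (p, q) hfind1]
          have hdl : (p ++ pvScan P ((c :: t).drop p.length)).drop p.length
              = pvScan P ((c :: t).drop p.length) := List.drop_left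
          rw [hdl]
          have hb2 : p.isPrefixOf (c :: t) = true :=
            List.isPrefixOf_iff_prefix.mpr ⟨rest, hrest⟩
          have hfindA : (P ++ [(p, q)]).find? (fun r => r.1.isPrefixOf (c :: t)) = some (p, q) := by
            rw [List.find?_append, hfind]
            simp [List.find?, hb2]
          rw [pvScan_match (P ++ [(p, q)]) hgA _ (p, q) hfindA]
          congr 1
          exact IH _ (by simp only [List.length_drop, List.length_cons]; omega)
        · have e0 : pvScan P (c :: t) = c :: pvScan P t := pvScan_none _ _ _ hfind
          rw [e0]
          have hnp : ¬ p <+: (c :: pvScan P t) := by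
            rw [← e0]
            intro hcon
            exact hpl (pvScan_prefix_reflect P hgP1 hgP2 p hA hC (c :: t) hcon)
          have hb1 : p.isPrefixOf (c :: pvScan P t) = false := by
            rw [← Bool.not_eq_true, List.isPrefixOf_iff_prefix]; exact hnp
          have hfind1 : [(p, q)].find? (fun r => r.1.isPrefixOf (c :: pvScan P t)) = none := by
            simp [List.find?, hb1]
          rw [pvScan_none _ _ _ hfind1]
          have hb2 : p.isPrefixOf (c :: t) = false := by
            rw [← Bool.not_eq_true, List.isPrefixOf_iff_prefix]; exact hpl
          have hfindA : (P ++ [(p, q)]).find? (fun r => r.1.isPrefixOf (c :: t)) = none := by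
            rw [List.find?_append, hfind]
            simp [List.find?, hb2]
          rw [pvScan_none _ _ _ hfindA]
          congr 1
          exact IH t (by omega)

-- one chain step: a replace pass after the scan with rule set R fuses into the scan
abbrev pvOk (R : List (List Char × List Char)) (p : List Char) : Prop :=
  p ≠ [] ∧ (∀ r ∈ R, r.1 ≠ []) ∧ (∀ r ∈ R, r.2 ≠ []) ∧
  (∀ r ∈ R, pvNoOv p r.2 0) ∧ (∀ r ∈ R, pvNoOv r.1 p 1) ∧ (∀ r ∈ R, pvNoOv r.2 p 1)

lemma pv_step (R : List (List Char × List Char)) (p q l : List Char) (h : pvOk R p) :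
    PySem.Chars.replace (pvScan R l) p q = pvScan (R ++ [(p, q)]) l := by
  obtain ⟨h1, h2, h3, h4, h5, h6⟩ := h
  rw [pv_replace_eq_pvScan _ _ _ h1]
  exact pvScan_fusion R p q h1 h2 h3 h4 h5 h6 l

lemma pv_chain (l : List Char) :
    PySem.Chars.replace (PySem.Chars.replace (PySem.Chars.replace (PySem.Chars.replace
      (PySem.Chars.replace (PySem.Chars.replace (PySem.Chars.replace (PySem.Chars.replace
        l "activePane=\"bottom_left\"".toList "activePane=\"bottomLeft\"".toList)
        "pane=\"bottom_left\"".toList "pane=\"bottomLeft\"".toList)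
        "activePane=\"bottom_right\"".toList "activePane=\"bottomRight\"".toList)
        "pane=\"bottom_right\"".toList "pane=\"bottomRight\"".toList)
        "activePane=\"top_left\"".toList "activePane=\"topLeft\"".toList)
        "pane=\"top_left\"".toList "pane=\"topLeft\"".toList)
        "activePane=\"top_right\"".toList "activePane=\"topRight\"".toList)
        "pane=\"top_right\"".toList "pane=\"topRight\"".toList
    = pvScan pvRulesB l := by
  rw [pv_replace_eq_pvScan l _ _ (by decide)]
  rw [pv_step _ _ _ l (by decide)]
  rw [pv_step _ _ _ l (by decide)]
  rw [pv_step _ _ _ l (by decide)]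
  rw [pv_step _ _ _ l (by decide)]
  rw [pv_step _ _ _ l (by decide)]
  rw [pv_step _ _ _ l (by decide)]
  rw [pv_step _ _ _ l (by decide)]
  have : ([("activePane=\"bottom_left\"".toList, "activePane=\"bottomLeft\"".toList)]
      ++ [("pane=\"bottom_left\"".toList, "pane=\"bottomLeft\"".toList)]
      ++ [("activePane=\"bottom_right\"".toList, "activePane=\"bottomRight\"".toList)]
      ++ [("pane=\"bottom_right\"".toList, "pane=\"bottomRight\"".toList)]
      ++ [("activePane=\"top_left\"".toList, "activePane=\"topLeft\"".toList)]
      ++ [("pane=\"top_left\"".toList, "pane=\"topLeft\"".toList)]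
      ++ [("activePane=\"top_right\"".toList, "activePane=\"topRight\"".toList)]
      ++ [("pane=\"top_right\"".toList, "pane=\"topRight\"".toList)]) = pvRulesB := by decide
  rw [this]

-- ===== VERDICT (by name: the statement is the Claim_ definition above) =====
theorem normalize_worksheet_xml_py_spec : Claim_equal_normalize_worksheet_xml_py := by
  intro xml_text _
  unfold Spec_normalize_worksheet_xml_py
  have h : (normalize_worksheet_xml_py xml_text).toList = pvScan pvRulesB xml_text.toList := by
    simp only [normalize_worksheet_xml_py, PySem.Str.toList_replace]
    exact pv_chain xml_text.toList
  calc normalize_worksheet_xml_py xml_text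
      = String.ofList (normalize_worksheet_xml_py xml_text).toList := String.ofList_toList.symm
    _ = String.ofList (pvScan pvRulesB xml_text.toList) := by rw [h]
    _ = normalize_worksheet_xml_py_alt xml_text := rfl
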